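-- pv_equiv track=rewrite | github.com/ChaosBelcebub/Python | sheet04/words.py | _next_word_helper
-- ===== SOURCE A (Python) =====
-- LETTERS = "abcdefghijklmnopqrstuvwxyz"+\
-- "ABCDEFGHIJKLMNOPQRSTUVWXYZ"+\
-- "ÄÖÜäöüß"
--
-- def _next_word_helper(s):
--     '''Helper function for next_word
--
--     Args:
--       s (string): a string
--         Holds the sentence
--
--     Returns:
--       tupel: 2 elements, first the next word, second the other string
--         first element is None if s[0] not in LETTERS
--
--     Examples:
--
--       >>> _next_word_helper("Test test")
--       ('Test', ' test')
--       >>> _next_word_helper("HelloWorld")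
--       ('HelloWorld', '')
--     '''
--
--     if not s:
--         return None, s
--     """if s[0] not in LETTERS"""
--     """Syntaxfehler, nach einer If Anweisung muss ein Doppelpunkt stehen"""
--     if s[0] not in LETTERS:
--         return None, s
--     word = s[0]
--     word_rest, s_rest = _next_word_helper(s[1:])
--     if word_rest:
--         """word = word_rest"""
--         """Semantischer Fehler. Es wird immer nur ein Buchstabe zurückgegeben"""
--         """Nicht ein ganzes Wort"""
--         word = word + word_rest
--     return word, s_rest
-- ===== SOURCE B (Python) =====
-- LETTERS = "abcdefghijklmnopqrstuvwxyz"+\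
-- "ABCDEFGHIJKLMNOPQRSTUVWXYZ"+\
-- "ÄÖÜäöüß"
--
-- def _next_word_helper(s):
--     if not s or s[0] not in LETTERS:
--         return None, s
--     i = 1
--     while i < len(s) and s[i] in LETTERS:
--         i += 1
--     return s[:i], s[i:]
-- ===== Notes on version B (the rewrite author's own statement) =====
-- stated objective: faster
-- what changed: Replaces A's char-by-char recursion, which rebuilds the word by repeated string concatenation on the way back up, with a single iterative forward scan for the end of the letter run followed by one slice each for the word and the rest.
import Mathlib
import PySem

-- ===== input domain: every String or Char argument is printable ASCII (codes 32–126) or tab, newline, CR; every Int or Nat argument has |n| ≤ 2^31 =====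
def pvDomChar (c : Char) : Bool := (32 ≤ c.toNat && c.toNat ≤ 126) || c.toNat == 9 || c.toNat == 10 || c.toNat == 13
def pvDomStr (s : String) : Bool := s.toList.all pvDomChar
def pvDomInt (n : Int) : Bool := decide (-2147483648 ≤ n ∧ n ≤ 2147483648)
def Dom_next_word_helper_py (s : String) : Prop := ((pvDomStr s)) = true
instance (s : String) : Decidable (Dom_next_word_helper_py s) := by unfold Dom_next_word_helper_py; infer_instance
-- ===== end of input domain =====

-- B replaces A's char-by-char recursion (which rebuilds the word by repeated concatenation)
-- with one forward scan for the end of the letter run plus two slices; return value only.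

def pvLetters : List Char :=
  ("abcdefghijklmnopqrstuvwxyz" ++ "ABCDEFGHIJKLMNOPQRSTUVWXYZ" ++ "ÄÖÜäöüß").toList

-- ===== PORT A =====
-- literal port of A's recursion, over the code points of s
def nwAux : List Char → Option (List Char) × List Char
  | [] => (none, [])                                          -- if not s: return None, s
  | c :: rest =>
    if PySem.Chars.isIn [c] pvLetters then                    -- if s[0] not in LETTERS: return None, s
      let p := nwAux rest                                     -- _next_word_helper(s[1:])
      let word := match p.1 with                              -- if word_rest: word = word + word_rest
        | some w => if w.isEmpty then [c] else c :: w
        | none => [c]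
      (some word, p.2)
    else
      (none, c :: rest)

def next_word_helper_py (s : String) : Option String × String :=
  let p := nwAux s.toList
  (p.1.map String.ofList, String.ofList p.2)

-- ===== PORT B =====
-- while i < len(s) and s[i] in LETTERS: i += 1   (index loop, fuel = length - i)
def nwScan (l : List Char) (i : Nat) : Nat :=
  if h : i < l.length then
    if PySem.Chars.isIn [l[i]] pvLetters then nwScan l (i + 1) else i
  else i
termination_by l.length - i

def next_word_helper_py_alt (s : String) : Option String × String :=
  match s.toList with
  | [] => (none, s)                                           -- if not s or s[0] not in LETTERS: return None, s
  | c :: _ =>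
    if PySem.Chars.isIn [c] pvLetters then
      let i := nwScan s.toList 1
      (some (String.ofList (s.toList.take i)), String.ofList (s.toList.drop i))  -- s[:i], s[i:], 0 ≤ i ≤ len(s)
    else
      (none, s)

-- ===== PRECONDITION & SPEC =====
def Spec_next_word_helper_py (s : String) (out : Option String × String) : Prop := out = next_word_helper_py_alt s
instance (s : String) (out : Option String × String) : Decidable (Spec_next_word_helper_py s out) := by unfold Spec_next_word_helper_py; infer_instance

-- ===== CLAIM (what is proved, stated in full; the proofs are below) =====
def Claim_equal_next_word_helper_py : Prop := ∀ (s : String), Dom_next_word_helper_py s → Spec_next_word_helper_py s (next_word_helper_py s)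

-- ===== LEMMAS AND PROOFS =====

def pvIsL (c : Char) : Bool := PySem.Chars.isIn [c] pvLetters

-- A's recursion returns (the leading letter run or none if it is empty, the rest)
theorem nwAux_char (l : List Char) :
    nwAux l = ((if l.takeWhile pvIsL = [] then none else some (l.takeWhile pvIsL)),
               l.dropWhile pvIsL) := by
  induction l with
  | nil => simp [nwAux]
  | cons c rest ih =>
    by_cases hc : pvIsL c = true
    · have hc2 : PySem.Chars.isIn [c] pvLetters = true := hc
      rw [List.takeWhile_cons_of_pos hc, List.dropWhile_cons_of_pos hc]
      simp only [nwAux, hc2, if_true, ih]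
      by_cases h0 : rest.takeWhile pvIsL = []
      · simp [h0]
      · simp [h0, List.isEmpty_iff]
    · have hc2 : PySem.Chars.isIn [c] pvLetters = false := by
        simpa [pvIsL] using hc
      rw [List.takeWhile_cons_of_neg (by simpa using hc), List.dropWhile_cons_of_neg (by simpa using hc)]
      simp [nwAux, hc2]

-- B's while loop lands at i plus the length of the letter run starting at i
theorem nwScan_eq (l : List Char) (i : Nat) :
    nwScan l i = i + ((l.drop i).takeWhile pvIsL).length := by
  fun_induction nwScan l i with
  | case1 i h hc ih =>
    rw [ih, List.drop_eq_getElem_cons h,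
      List.takeWhile_cons_of_pos (by simpa [pvIsL] using hc)]
    simp; omega
  | case2 i h hc =>
    rw [List.drop_eq_getElem_cons h,
      List.takeWhile_cons_of_neg (by simpa [pvIsL] using hc)]
    simp
  | case3 i h =>
    rw [List.drop_eq_nil_of_le (by omega)]
    simp

-- ===== VERDICT (by name: the statement is the Claim_ definition above) =====
theorem next_word_helper_py_spec : Claim_equal_next_word_helper_py := by
  intro s _
  unfold Spec_next_word_helper_py next_word_helper_py next_word_helper_py_alt
  cases hl : s.toList with
  | nil =>
    have hs : String.ofList ([] : List Char) = s := by rw [← hl, String.ofList_toList]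
    simp [nwAux, hs]
  | cons c rest =>
    have hs : String.ofList (c :: rest) = s := by rw [← hl, String.ofList_toList]
    by_cases hc : pvIsL c = true
    · have hc2 : PySem.Chars.isIn [c] pvLetters = true := hc
      obtain ⟨tw, htw⟩ : ∃ tw, List.takeWhile pvIsL (c :: rest) = tw := ⟨_, rfl⟩
      obtain ⟨dw, hdw⟩ : ∃ dw, List.dropWhile pvIsL (c :: rest) = dw := ⟨_, rfl⟩
      have hsplit : tw ++ dw = c :: rest := by
        rw [← htw, ← hdw]; exact List.takeWhile_append_dropWhile
      have hscan : nwScan (c :: rest) 1 = tw.length := by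
        rw [nwScan_eq, ← htw, List.takeWhile_cons_of_pos hc]
        simp; omega
      have htake : (c :: rest).take tw.length = tw := by
        rw [← hsplit, List.take_left]
      have hdrop : (c :: rest).drop tw.length = dw := by
        rw [← hsplit, List.drop_left]
      have hne : tw ≠ [] := by
        rw [← htw, List.takeWhile_cons_of_pos hc]; simp
      simp only [hc2, if_true, nwAux_char, htw, hdw, hscan, htake, hdrop, if_neg hne]
      simp
    · have hc2 : PySem.Chars.isIn [c] pvLetters = false := by simpa [pvIsL] using hc
      have h1 : (c :: rest).takeWhile pvIsL = [] := by
        rw [List.takeWhile_cons_of_neg (by simpa using hc)]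
      have h2 : (c :: rest).dropWhile pvIsL = c :: rest := by
        rw [List.dropWhile_cons_of_neg (by simpa using hc)]
      simp only [hc2, Bool.false_eq_true, if_false, nwAux_char, h1, h2]
      simp [hs]
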